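-- pv_equiv track=rewrite | github.com/csaratchandra/ProductOS | core/python/productos_runtime/research.py | _planned_signal_lane_ids
-- ===== SOURCE A (Python) =====
-- from typing import Any
--
-- CORE_RESEARCH_SIGNAL_LANES = [
--     {
--         "signal_lane_id": "market",
--         "label": "market",
--         "source_types": {"market_validation", "security_review"},
--         "preferred_source_type": "market_validation",
--     },
--     {
--         "signal_lane_id": "competitor",
--         "label": "competitor",
--         "source_types": {"competitor_research"},
--         "preferred_source_type": "competitor_research",
--     },
--     {
--         "signal_lane_id": "customer",
--         "label": "customer",
--         "source_types": {"customer_evidence", "operator_interview"},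
--         "preferred_source_type": "customer_evidence",
--     },
-- ]
--
-- def _signal_lane_definition_for_source_type(source_type: str) -> dict[str, Any] | None:
--     for lane in CORE_RESEARCH_SIGNAL_LANES:
--         if source_type in lane["source_types"]:
--             return lane
--     return None
--
-- def _signal_lane_id_for_source_type(source_type: str) -> str:
--     lane = _signal_lane_definition_for_source_type(source_type)
--     if lane is None:
--         return source_type
--     return lane["signal_lane_id"]
--
-- def _core_signal_lane_ids() -> list[str]:
--     return [lane["signal_lane_id"] for lane in CORE_RESEARCH_SIGNAL_LANES]
--
-- def _planned_signal_lane_ids(questions: list[dict[str, Any]]) -> list[str]: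
--     present_signal_lanes = {
--         _signal_lane_id_for_source_type(question["recommended_source_type"])
--         for question in questions
--         if isinstance(question, dict) and isinstance(question.get("recommended_source_type"), str)
--     }
--     ordered_signal_lanes = [
--         lane_id for lane_id in _core_signal_lane_ids() if lane_id in present_signal_lanes
--     ]
--     remaining_signal_lanes = sorted(present_signal_lanes - set(ordered_signal_lanes))
--     return [*ordered_signal_lanes, *remaining_signal_lanes]
-- ===== SOURCE B (Python) =====
-- from typing import Any
--
-- CORE_RESEARCH_SIGNAL_LANES = [
--     {
--         "signal_lane_id": "market",
--         "label": "market",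
--         "source_types": {"market_validation", "security_review"},
--         "preferred_source_type": "market_validation",
--     },
--     {
--         "signal_lane_id": "competitor",
--         "label": "competitor",
--         "source_types": {"competitor_research"},
--         "preferred_source_type": "competitor_research",
--     },
--     {
--         "signal_lane_id": "customer",
--         "label": "customer",
--         "source_types": {"customer_evidence", "operator_interview"},
--         "preferred_source_type": "customer_evidence",
--     },
-- ]
--
-- def _signal_lane_id_for_source_type(source_type: str) -> str:
--     for lane in CORE_RESEARCH_SIGNAL_LANES:
--         if source_type in lane["source_types"]:
--             return lane["signal_lane_id"]
--     return source_type
--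
-- def _planned_signal_lane_ids(questions: list[dict[str, Any]]) -> list[str]:
--     present_signal_lanes = {
--         _signal_lane_id_for_source_type(question["recommended_source_type"])
--         for question in questions
--         if isinstance(question, dict) and isinstance(question.get("recommended_source_type"), str)
--     }
--     rank = {
--         lane["signal_lane_id"]: index
--         for index, lane in enumerate(CORE_RESEARCH_SIGNAL_LANES)
--     }
--     sentinel = len(CORE_RESEARCH_SIGNAL_LANES)
--     return sorted(
--         present_signal_lanes,
--         key=lambda lane_id: (rank[lane_id], "") if lane_id in rank else (sentinel, lane_id),
--     )
-- ===== Notes on version B (the rewrite author's own statement) =====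
-- stated objective: idiomatic
-- what changed: A builds the ordering in two differently-shaped passes (filter the core lane ids in canonical order, then sort the set-difference alphabetically and concatenate); B builds the same present-lane set and produces the whole result with one sorted() call using a composite (core-rank, tie-break) key, with rank looked up in a dict built once from the core lanes.
import Mathlib
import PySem

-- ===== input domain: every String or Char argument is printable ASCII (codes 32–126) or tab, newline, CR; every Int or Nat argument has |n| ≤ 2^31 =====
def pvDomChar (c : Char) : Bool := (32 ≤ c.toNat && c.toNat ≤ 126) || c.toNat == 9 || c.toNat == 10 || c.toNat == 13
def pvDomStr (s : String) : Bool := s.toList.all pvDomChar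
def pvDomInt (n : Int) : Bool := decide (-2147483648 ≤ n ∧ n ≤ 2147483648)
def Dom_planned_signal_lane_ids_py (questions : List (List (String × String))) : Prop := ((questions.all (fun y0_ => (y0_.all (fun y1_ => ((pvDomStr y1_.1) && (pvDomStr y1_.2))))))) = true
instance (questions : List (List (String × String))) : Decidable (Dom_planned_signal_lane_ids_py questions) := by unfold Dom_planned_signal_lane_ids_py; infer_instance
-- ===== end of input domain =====

-- B replaces A's two differently-shaped ordering passes (filter core lanes in order,
-- then sort the set-difference) by ONE sorted() over the present set with a composite
-- (rank, tie-break) key; same return value, objective: alternative/idiomatic.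

-- ===== PORT A =====
-- CORE_RESEARCH_SIGNAL_LANES, kept as (signal_lane_id, source_types); label and
-- preferred_source_type are never read by this function and are omitted.
def pvCoreLanes : List (String × PySem.Set String) :=
  [("market", PySem.Set.ofList ["market_validation", "security_review"]),
   ("competitor", PySem.Set.ofList ["competitor_research"]),
   ("customer", PySem.Set.ofList ["customer_evidence", "operator_interview"])]

-- _signal_lane_definition_for_source_type: first lane whose source_types contains it
def pvSignalLaneDefFor (source_type : String) : Option (String × PySem.Set String) :=
  pvCoreLanes.find? (fun lane => PySem.Set.contains lane.2 source_type)

-- _signal_lane_id_for_source_type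
def pvSignalLaneIdFor (source_type : String) : String :=
  match pvSignalLaneDefFor source_type with
  | none => source_type
  | some lane => lane.1

-- _core_signal_lane_ids
def pvCoreSignalLaneIds : List String := pvCoreLanes.map (fun lane => lane.1)

-- _planned_signal_lane_ids. isinstance(question, dict) is always true under the type
-- convention; isinstance(question.get(...), str) is true iff the key is present.
def planned_signal_lane_ids_py (questions : List (List (String × String))) : List String :=
  let present_signal_lanes : PySem.Set String :=
    PySem.Set.ofList (questions.filterMap (fun question =>
      ((PySem.Dict.mk question).get? "recommended_source_type").map pvSignalLaneIdFor))
  let ordered_signal_lanes :=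
    pvCoreSignalLaneIds.filter (fun lane_id => PySem.Set.contains present_signal_lanes lane_id)
  let remaining_signal_lanes :=
    PySem.List.sorted (PySem.Set.diff present_signal_lanes (PySem.Set.ofList ordered_signal_lanes))
      (fun x => x)
  ordered_signal_lanes ++ remaining_signal_lanes

-- ===== PORT B =====
-- Source B's _signal_lane_id_for_source_type (single loop returning the id directly)
def pvAltSignalLaneIdFor (source_type : String) : String :=
  match pvCoreLanes.find? (fun lane => PySem.Set.contains lane.2 source_type) with
  | some lane => lane.1
  | none => source_type

-- rank = {lane["signal_lane_id"]: index for index, lane in enumerate(CORE_RESEARCH_SIGNAL_LANES)}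
def pvAltRank : PySem.Dict String Int :=
  (PySem.List.enumerate pvCoreLanes).foldl
    (fun d p => d.insert p.2.1 p.1) PySem.Dict.empty

-- the two components of Source B's composite sort key
-- (rank[lane_id], "") if lane_id in rank else (sentinel, lane_id), sentinel = len(core)
def pvAltKey1 (lane_id : String) : Int :=
  if pvAltRank.contains lane_id then pvAltRank.getD lane_id 0 else (pvCoreLanes.length : Int)

def pvAltKey2 (lane_id : String) : String :=
  if pvAltRank.contains lane_id then "" else lane_id

def planned_signal_lane_ids_py_alt (questions : List (List (String × String))) : List String :=
  let present_signal_lanes : PySem.Set String :=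
    PySem.Set.ofList (questions.filterMap (fun question =>
      ((PySem.Dict.mk question).get? "recommended_source_type").map pvAltSignalLaneIdFor))
  PySem.List.sorted2 present_signal_lanes pvAltKey1 pvAltKey2

-- ===== PRECONDITION & SPEC =====
def Spec_planned_signal_lane_ids_py (questions : List (List (String × String))) (out : List String) : Prop := out = planned_signal_lane_ids_py_alt questions
instance (questions : List (List (String × String))) (out : List String) : Decidable (Spec_planned_signal_lane_ids_py questions out) := by unfold Spec_planned_signal_lane_ids_py; infer_instance

-- ===== CLAIM (what is proved, stated in full; the proofs are below) =====
def Claim_equal_planned_signal_lane_ids_py : Prop := ∀ (questions : List (List (String × String))), Dom_planned_signal_lane_ids_py questions → Spec_planned_signal_lane_ids_py questions (planned_signal_lane_ids_py questions)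

-- ===== LEMMAS AND PROOFS =====

-- B's lane-id helper computes the same mapping as A's pair of helpers.
theorem pvAltSignalLaneIdFor_eq : pvAltSignalLaneIdFor = pvSignalLaneIdFor := by
  funext s
  unfold pvAltSignalLaneIdFor pvSignalLaneIdFor pvSignalLaneDefFor
  cases pvCoreLanes.find? (fun lane => PySem.Set.contains lane.2 s) <;> rfl

theorem pvAltRank_eq :
    pvAltRank = PySem.Dict.mk [("market", 0), ("competitor", 1), ("customer", 2)] := by
  decide

theorem pvCoreSignalLaneIds_eq :
    pvCoreSignalLaneIds = ["market", "competitor", "customer"] := by decide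

-- spec of the first key component
def pvRankSpec (l : String) : Int :=
  if l = "market" then 0 else if l = "competitor" then 1 else if l = "customer" then 2 else 3

theorem pvAltKey1_eval (l : String) : pvAltKey1 l = pvRankSpec l := by
  by_cases h1 : l = "market"
  · subst h1; decide
  by_cases h2 : l = "competitor"
  · subst h2; decide
  by_cases h3 : l = "customer"
  · subst h3; decide
  unfold pvAltKey1 pvRankSpec
  rw [pvAltRank_eq]
  simp [PySem.Dict.contains_mk, h1, h2, h3, Ne.symm h1, Ne.symm h2, Ne.symm h3]
  decide

theorem pvAltKey2_eval (l : String) (h : l ∉ pvCoreSignalLaneIds) : pvAltKey2 l = l := by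
  rw [pvCoreSignalLaneIds_eq] at h
  simp only [List.mem_cons, List.not_mem_nil, or_false, not_or] at h
  obtain ⟨h1, h2, h3⟩ := h
  unfold pvAltKey2
  rw [pvAltRank_eq]
  simp [PySem.Dict.contains_mk, Ne.symm h1, Ne.symm h2, Ne.symm h3]

theorem pvAltKey1_noncore (l : String) (h : l ∉ pvCoreSignalLaneIds) : pvAltKey1 l = 3 := by
  rw [pvCoreSignalLaneIds_eq] at h
  simp only [List.mem_cons, List.not_mem_nil, or_false, not_or] at h
  obtain ⟨h1, h2, h3⟩ := h
  rw [pvAltKey1_eval]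
  unfold pvRankSpec
  simp [h1, h2, h3]

theorem pvAltKey1_core_lt (l : String) (h : l ∈ pvCoreSignalLaneIds) : pvAltKey1 l < 3 := by
  rw [pvCoreSignalLaneIds_eq] at h
  simp only [List.mem_cons, List.not_mem_nil, or_false] at h
  rcases h with h | h | h <;> subst h <;> decide

-- Source B's composite key, as a single lexicographic key
def pvLexKey (l : String) : Lex (Int × String) := toLex (pvAltKey1 l, pvAltKey2 l)

-- sorted2 with the two key components IS sorted with the lexicographic key
theorem sorted2_eq_sorted_lex (xs : List String) :
    PySem.List.sorted2 xs pvAltKey1 pvAltKey2 = PySem.List.sorted xs pvLexKey := by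
  rw [PySem.List.sorted_eq_foldl_insertBy]
  unfold PySem.List.sorted2
  simp only [Bool.false_eq_true, if_false]
  have hbefore : (fun a b => decide (pvAltKey1 a < pvAltKey1 b) ||
      (!decide (pvAltKey1 b < pvAltKey1 a) && decide (pvAltKey2 a < pvAltKey2 b))) =
      (fun a b => decide (pvLexKey a < pvLexKey b)) := by
    funext a b
    unfold pvLexKey
    by_cases h : pvAltKey1 a < pvAltKey1 b
    · simp [Prod.Lex.lt_iff, h]
    · by_cases he : pvAltKey1 a = pvAltKey1 b
      · simp [Prod.Lex.lt_iff, he]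
      · have hgt : pvAltKey1 b < pvAltKey1 a :=
          lt_of_le_of_ne (le_of_not_gt h) (fun hba => he (hba.symm))
        simp [Prod.Lex.lt_iff, h, he, hgt]
  rw [hbefore]

-- the heart: A's two-pass output is the strictly key-increasing rearrangement of P
theorem main_perm_pairwise (P : List String) (hnd : P.Nodup) :
    PySem.List.sorted P pvLexKey =
      (pvCoreSignalLaneIds.filter (fun lane_id => PySem.Set.contains P lane_id)) ++
        PySem.List.sorted
          (PySem.Set.diff P (PySem.Set.ofList
            (pvCoreSignalLaneIds.filter (fun lane_id => PySem.Set.contains P lane_id))))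
          (fun x => x) := by
  set ordered := pvCoreSignalLaneIds.filter (fun lane_id => PySem.Set.contains P lane_id) with hord
  set diffS := PySem.Set.diff P (PySem.Set.ofList ordered) with hdiff
  set rem := PySem.List.sorted diffS (fun x => x) with hrem
  have hcontains : ∀ (l : List String) (x : String), PySem.Set.contains l x = true ↔ x ∈ l := by
    intro l x; simp [PySem.Set.contains]
  have hmem_ord : ∀ x, x ∈ ordered ↔ x ∈ pvCoreSignalLaneIds ∧ x ∈ P := by
    intro x; rw [hord]; simp [List.mem_filter]
  have hmem_diff : ∀ x, x ∈ diffS ↔ x ∈ P ∧ x ∉ pvCoreSignalLaneIds := by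
    intro x
    rw [hdiff]
    unfold PySem.Set.diff
    simp only [List.mem_filter, Bool.not_eq_eq_eq_not, Bool.not_true]
    constructor
    · rintro ⟨hP, hc⟩
      refine ⟨hP, fun hcore => ?_⟩
      have : x ∈ PySem.Set.ofList ordered := (PySem.Set.mem_ofList _ _).mpr
        ((hmem_ord x).mpr ⟨hcore, hP⟩)
      rw [(hcontains _ _).mpr this] at hc
      exact Bool.true_eq_false.mp hc
    · rintro ⟨hP, hnc⟩
      refine ⟨hP, ?_⟩
      rw [← Bool.not_eq_true]
      intro hc
      exact hnc (((hmem_ord x).mp ((PySem.Set.mem_ofList _ _).mp ((hcontains _ _).mp hc))).1)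
  have hnd_core : pvCoreSignalLaneIds.Nodup := by decide
  have hnd_ord : ordered.Nodup := hnd_core.filter _
  have hnd_diff : diffS.Nodup := by rw [hdiff]; exact hnd.filter _
  have hperm_rem : rem.Perm diffS := PySem.List.sorted_perm _ _ _
  have hnd_rem : rem.Nodup := hperm_rem.nodup_iff.mpr hnd_diff
  have hmem_rem : ∀ x, x ∈ rem ↔ x ∈ P ∧ x ∉ pvCoreSignalLaneIds := by
    intro x; rw [hperm_rem.mem_iff]; exact hmem_diff x
  apply PySem.List.sorted_eq_of_perm_of_pairwise_lt
  · -- (ordered ++ rem).Perm P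
    refine (List.perm_ext_iff_of_nodup ?_ hnd).mpr ?_
    · refine hnd_ord.append hnd_rem ?_
      intro a ha hr
      exact ((hmem_rem a).mp hr).2 ((hmem_ord a).mp ha).1
    · intro a
      simp only [List.mem_append, hmem_ord, hmem_rem]
      constructor
      · rintro (⟨_, hP⟩ | ⟨hP, _⟩) <;> exact hP
      · intro hP
        by_cases hc : a ∈ pvCoreSignalLaneIds
        · exact Or.inl ⟨hc, hP⟩
        · exact Or.inr ⟨hP, hc⟩
  · -- strictly increasing under the lexicographic key
    rw [List.pairwise_append]
    refine ⟨?_, ?_, ?_⟩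
    · refine List.Pairwise.filter _ (l := pvCoreSignalLaneIds)
        (R := fun a b => pvLexKey a < pvLexKey b) ?_
      rw [pvCoreSignalLaneIds_eq]
      decide
    · have hle := PySem.List.sorted_pairwise diffS (fun x => x)
      rw [← hrem] at hle
      refine List.Pairwise.imp_of_mem ?_ (hle.and hnd_rem)
      intro a b ha hb hab
      have hanc := ((hmem_rem a).mp ha).2
      have hbnc := ((hmem_rem b).mp hb).2
      unfold pvLexKey
      rw [pvAltKey1_noncore a hanc, pvAltKey1_noncore b hbnc,
        pvAltKey2_eval a hanc, pvAltKey2_eval b hbnc]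
      rw [Prod.Lex.lt_iff]
      exact Or.inr ⟨rfl, lt_of_le_of_ne hab.1 hab.2⟩
    · intro a ha b hb
      have hac := ((hmem_ord a).mp ha).1
      have hbnc := ((hmem_rem b).mp hb).2
      unfold pvLexKey
      rw [Prod.Lex.lt_iff]
      left
      rw [pvAltKey1_noncore b hbnc]
      exact pvAltKey1_core_lt a hac

theorem planned_signal_lane_ids_py_spec' (questions : List (List (String × String))) :
    planned_signal_lane_ids_py questions = planned_signal_lane_ids_py_alt questions := by
  unfold planned_signal_lane_ids_py planned_signal_lane_ids_py_alt
  rw [pvAltSignalLaneIdFor_eq]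
  rw [sorted2_eq_sorted_lex]
  exact (main_perm_pairwise _ (PySem.Set.nodup_ofList _)).symm

-- ===== VERDICT (by name: the statement is the Claim_ definition above) =====
theorem planned_signal_lane_ids_py_spec : Claim_equal_planned_signal_lane_ids_py := by
  intro questions _
  unfold Spec_planned_signal_lane_ids_py
  exact planned_signal_lane_ids_py_spec' questions
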